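-- pv_equiv track=rewrite | github.com/marceelobruno/algoritmo_programacao_estruturada | exercicios/lista_exercicios_08_vetor_extra/exercicios_vetores_diversos/_15.py | transforma_vetor
-- ===== SOURCE A (Python) =====
-- def transforma_vetor(tam: int, vetor: list) -> list:
--     for i in range(tam):
--         if vetor[i] < 0:
--             vetor[i] = 0
--         elif vetor[i] < 10:
--             vetor[i] = 1
--         else:
--             vetor[i] = 2
--     return vetor
-- ===== SOURCE B (Python) =====
-- def transforma_vetor(tam: int, vetor: list) -> list:
--     # Table-driven: classify each element by a hand-written binary search over the
--     # threshold table [0, 10] (insertion point = class 0/1/2), scanning the prefix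
--     # back-to-front with a while loop; same in-place mutation, same return.
--     thresholds = [0, 10]
--     i = tam
--     while i > 0:
--         i -= 1
--         x = vetor[i]
--         lo, hi = 0, len(thresholds)
--         while lo < hi:
--             mid = (lo + hi) // 2
--             if x < thresholds[mid]:
--                 hi = mid
--             else:
--                 lo = mid + 1
--         vetor[i] = lo
--     return vetor
-- ===== Notes on version B (the rewrite author's own statement) =====
-- stated objective: alternative
-- what changed: Replaces the if/elif/else branch chain by a table-driven classification: a hand-written binary search over the threshold table [0,10] computes the class, and the prefix is processed back-to-front with a while loop instead of a forward for-range loop.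
import Mathlib
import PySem

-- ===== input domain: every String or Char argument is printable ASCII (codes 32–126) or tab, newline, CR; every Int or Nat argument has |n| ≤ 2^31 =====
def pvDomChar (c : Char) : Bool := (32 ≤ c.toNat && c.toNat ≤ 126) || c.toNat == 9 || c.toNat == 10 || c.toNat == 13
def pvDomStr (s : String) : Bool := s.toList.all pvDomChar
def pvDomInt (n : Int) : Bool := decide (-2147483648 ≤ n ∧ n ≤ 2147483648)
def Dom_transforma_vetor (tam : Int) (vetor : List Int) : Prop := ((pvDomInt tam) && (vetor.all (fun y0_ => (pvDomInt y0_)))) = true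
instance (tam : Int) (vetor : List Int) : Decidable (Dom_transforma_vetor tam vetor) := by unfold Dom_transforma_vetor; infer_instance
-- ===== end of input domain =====

-- B replaces A's forward for-loop with an if/elif/else chain by a back-to-front
-- while loop classifying each element via a hand-written binary search over the
-- threshold table [0,10] (alternative; same in-place mutation, return value only proved).

-- ===== PORT A =====
def transforma_vetor (tam : Int) (vetor : List Int) : List Int :=
  (PySem.List.pyRange 0 tam 1).foldl
    (fun v i =>
      match PySem.List.pyGet? v i with
      | some x => v.set i.toNat (if x < 0 then 0 else if x < 10 then 1 else 2)
      | none => v)  -- IndexError in Python; excluded by Pre_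
    vetor

-- ===== PORT B =====
-- inner while lo < hi: binary search over the threshold table
def pvBisect (th : List Int) (x : Int) (lo hi : Nat) : Nat :=
  if h : lo < hi then
    let mid := (lo + hi) / 2
    if x < th.getD mid 0 then pvBisect th x lo mid
    else pvBisect th x (mid + 1) hi
  else lo
termination_by hi - lo
decreasing_by all_goals omega

-- outer while i > 0: i counts down from tam
def pvLoopBack (vetor : List Int) (i : Nat) : List Int :=
  match i with
  | 0 => vetor
  | i + 1 =>
    pvLoopBack
      (match PySem.List.pyGet? vetor (i : Int) with
       | some x => vetor.set i ((pvBisect [0, 10] x 0 2 : Nat) : Int)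
       | none => vetor)  -- IndexError in Python; excluded by Pre_
      i

def transforma_vetor_alt (tam : Int) (vetor : List Int) : List Int :=
  pvLoopBack vetor tam.toNat

-- ===== PRECONDITION & SPEC =====
-- Pre_ excludes exactly tam > len(vetor), where both A and B raise IndexError.
def Pre_transforma_vetor (tam : Int) (vetor : List Int) : Prop :=
  tam ≤ vetor.length
instance (tam : Int) (vetor : List Int) : Decidable (Pre_transforma_vetor tam vetor) := by
  unfold Pre_transforma_vetor; infer_instance
def pvWitness_transforma_vetor : Int × List Int := (2, [5, 20])

def Spec_transforma_vetor (tam : Int) (vetor : List Int) (out : List Int) : Prop := out = transforma_vetor_alt tam vetor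
instance (tam : Int) (vetor : List Int) (out : List Int) : Decidable (Spec_transforma_vetor tam vetor out) := by unfold Spec_transforma_vetor; infer_instance

-- ===== CLAIM (what is proved, stated in full; the proofs are below) =====
def Claim_equal_transforma_vetor : Prop := ∀ (tam : Int) (vetor : List Int), Dom_transforma_vetor tam vetor → Pre_transforma_vetor tam vetor → Spec_transforma_vetor tam vetor (transforma_vetor tam vetor)

-- ===== LEMMAS AND PROOFS =====

-- A's classification of one element
def pvStepA (x : Int) : Int := if x < 0 then 0 else if x < 10 then 1 else 2

-- B's binary search over [0,10] computes exactly A's class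
theorem pvBisect_base (th : List Int) (x : Int) (n : Nat) : pvBisect th x n n = n := by
  rw [pvBisect]; simp

theorem pvBisect_eval (x : Int) : ((pvBisect [0, 10] x 0 2 : Nat) : Int) = pvStepA x := by
  rw [pvBisect]
  norm_num
  by_cases h10 : x < 10
  · rw [if_pos h10, pvBisect]
    norm_num
    by_cases h0 : x < 0
    · rw [if_pos h0, pvBisect_base]; simp [pvStepA, h0]
    · rw [if_neg h0, pvBisect_base]; simp [pvStepA, h0, h10]
  · rw [if_neg h10, pvBisect_base]
    simp [pvStepA, h10, show ¬ x < 0 by omega]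

-- A's loop invariant: after the first n iterations the first n slots hold pvStepA
theorem pvLoopA (v : List Int) (n : Nat) (hn : n ≤ v.length) :
    (PySem.List.pyRange 0 (n : Int) 1).foldl
      (fun w i =>
        match PySem.List.pyGet? w i with
        | some x => w.set i.toNat (pvStepA x)
        | none => w) v
      = (v.take n).map pvStepA ++ v.drop n := by
  induction n with
  | zero => simp [PySem.List.pyRange_one_eq_nil]
  | succ m ih =>
    have hm : m ≤ v.length := Nat.le_of_succ_le hn
    have hmv : m < v.length := by omega
    have hsplit : PySem.List.pyRange 0 ((m : Int) + 1) 1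
        = PySem.List.pyRange 0 (m : Int) 1 ++ [(m : Int)] :=
      PySem.List.pyRange_one_succ_right (by exact_mod_cast Nat.zero_le m)
    have hcast : ((Nat.succ m : Nat) : Int) = (m : Int) + 1 := by push_cast; ring
    rw [hcast, hsplit, List.foldl_append, ih hm]
    simp only [List.foldl_cons, List.foldl_nil]
    have hlenmap : ((v.take m).map pvStepA).length = m := by
      rw [List.length_map, List.length_take, Nat.min_eq_left hm]
    have hidx : (m : Int) = ((((v.take m).map pvStepA).length : Nat) : Int) + ((0 : Nat) : Int) := by
      rw [hlenmap]; simp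
    rw [hidx, PySem.List.pyGet?_append_right]
    have hd : v.drop m = v[m] :: v.drop (m + 1) := by
      exact (List.drop_eq_getElem_cons hmv).trans (by simp)
    rw [hd]
    simp only [List.getElem?_cons_zero]
    rw [show ((((((v.take m).map pvStepA).length : Nat) : Int) + ((0 : Nat) : Int)).toNat)
        = ((v.take m).map pvStepA).length from by omega]
    rw [List.set_append_right _ _ (Nat.le_refl _), Nat.sub_self, List.set_cons_zero]
    have htk : (v.take (m + 1)).map pvStepA = (v.take m).map pvStepA ++ [pvStepA v[m]] := by
      rw [List.map_take, List.map_take, List.take_add_one, List.getElem?_map,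
        List.getElem?_eq_getElem hmv]
      simp
    rw [htk, List.append_assoc, List.singleton_append]

-- setting index m does not change the suffix from m+1
theorem hdrop2 (v : List Int) (a : Int) (m : Nat) :
    (v.set m a).drop (m + 1) = v.drop (m + 1) := by
  apply List.ext_getElem
  · simp
  · intro i h1 h2
    simp [List.getElem_drop, Nat.ne_of_lt (by omega : m < m + 1 + i)]

-- B's loop invariant: the back-to-front loop over the first n slots maps pvStepA on the prefix
theorem pvLoopB (v : List Int) (n : Nat) (hn : n ≤ v.length) :
    pvLoopBack v n = (v.take n).map pvStepA ++ v.drop n := by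
  induction n generalizing v with
  | zero => simp [pvLoopBack]
  | succ m ih =>
    have hmv : m < v.length := by omega
    unfold pvLoopBack
    have hget : PySem.List.pyGet? v (m : Int) = some v[m] := by
      simp [PySem.List.pyGet?, PySem.List.pyIdx?, hmv]
    simp only [hget, pvBisect_eval]
    have hlen : (v.set m (pvStepA v[m])).length = v.length := by simp
    rw [ih (v.set m (pvStepA v[m])) (by omega)]
    have htake : (v.set m (pvStepA v[m])).take m = v.take m := by
      rw [List.take_set, List.set_eq_of_length_le (by simp)]
    have hdrop : (v.set m (pvStepA v[m])).drop m = pvStepA v[m] :: v.drop (m + 1) := by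
      rw [List.drop_eq_getElem_cons (by omega : m < (v.set m (pvStepA v[m])).length)]
      congr 1
      · simp
      · exact hdrop2 v (pvStepA v[m]) m
    rw [htake, hdrop]
    have htk : (v.take (m + 1)).map pvStepA = (v.take m).map pvStepA ++ [pvStepA v[m]] := by
      rw [List.map_take, List.map_take, List.take_add_one, List.getElem?_map,
        List.getElem?_eq_getElem hmv]
      simp
    rw [htk, List.append_assoc, List.singleton_append]

-- ===== VERDICT (by name: the statement is the Claim_ definition above) =====
theorem transforma_vetor_spec : Claim_equal_transforma_vetor := by
  intro tam vetor _ hle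
  unfold Pre_transforma_vetor at hle
  unfold Spec_transforma_vetor transforma_vetor transforma_vetor_alt
  have hn : tam.toNat ≤ vetor.length := by omega
  have hrange : PySem.List.pyRange 0 tam 1 = PySem.List.pyRange 0 ((tam.toNat : Nat) : Int) 1 := by
    by_cases h : 0 ≤ tam
    · congr 1; omega
    · rw [PySem.List.pyRange_one_eq_nil (by omega), PySem.List.pyRange_one_eq_nil (by omega)]
  rw [hrange]
  have hfoldA := pvLoopA vetor tam.toNat hn
  unfold pvStepA at hfoldA
  rw [hfoldA, pvLoopB vetor tam.toNat hn]
  rfl
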